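-- pv_equiv track=rewrite | github.com/raffelprama/trello-agent | app/nodes/entity_resolver.py | _find_board
-- ===== SOURCE A (Python) =====
-- from typing import Any
--
-- def _norm(s: str | None) -> str:
--     return (s or "").strip().lower()
--
-- def _find_board(boards: list[dict[str, Any]], name: str | None) -> dict[str, Any] | None:
--     if not name:
--         return None
--     n = _norm(name)
--     for b in boards:
--         if _norm(b.get("name")) == n:
--             return b
--     for b in boards:
--         if n in _norm(b.get("name")):
--             return b
--     return None
-- ===== SOURCE B (Python) =====
-- def _norm(s):
--     return (s or "").strip().lower()
--
-- def _find_board(boards, name):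
--     if not name:
--         return None
--     n = _norm(name)
--     first_sub = None
--     for b in boards:
--         m = _norm(b.get("name"))
--         if m == n:
--             return b
--         if first_sub is None and n in m:
--             first_sub = b
--     return first_sub
-- ===== Notes on version B (the rewrite author's own statement) =====
-- stated objective: alternative
-- what changed: Two sequential scans (exact pass, then substring pass) replaced by a single pass that returns immediately on an exact match while remembering the first substring match; each board's name is normalized once instead of twice.
import Mathlib
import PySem

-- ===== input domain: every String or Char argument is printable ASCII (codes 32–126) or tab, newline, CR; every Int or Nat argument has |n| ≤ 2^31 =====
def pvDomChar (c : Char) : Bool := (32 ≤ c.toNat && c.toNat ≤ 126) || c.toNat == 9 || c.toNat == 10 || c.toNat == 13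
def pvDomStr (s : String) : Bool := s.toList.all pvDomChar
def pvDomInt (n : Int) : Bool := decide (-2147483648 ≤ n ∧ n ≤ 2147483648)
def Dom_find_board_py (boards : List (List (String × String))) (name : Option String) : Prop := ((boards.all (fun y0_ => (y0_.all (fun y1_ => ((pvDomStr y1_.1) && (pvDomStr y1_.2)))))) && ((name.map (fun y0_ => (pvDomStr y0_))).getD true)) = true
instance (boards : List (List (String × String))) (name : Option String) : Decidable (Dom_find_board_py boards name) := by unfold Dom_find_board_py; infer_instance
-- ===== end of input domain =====

-- B replaces A's two sequential scans (exact pass, then substring pass) by ONE pass that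
-- returns immediately on an exact match and remembers the first substring match;
-- each board's name is normalized once instead of twice.

-- ===== PORT A =====
-- _norm(s) = (s or "").strip().lower()
def pvNorm (s : Option String) : String :=
  PySem.Str.lower (PySem.Str.strip (match s with
    | none => ""
    | some t => if t == "" then "" else t))

-- first loop of A: exact-match scan
def pvLoopExact (boards : List (List (String × String))) (n : String) : Option (List (String × String)) :=
  match boards with
  | [] => none
  | b :: bs => if pvNorm ((PySem.Dict.mk b).get? "name") == n then some b else pvLoopExact bs n

-- second loop of A: substring scan
def pvLoopSub (boards : List (List (String × String))) (n : String) : Option (List (String × String)) :=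
  match boards with
  | [] => none
  | b :: bs => if PySem.Str.isIn n (pvNorm ((PySem.Dict.mk b).get? "name")) then some b else pvLoopSub bs n

def find_board_py (boards : List (List (String × String))) (name : Option String) : Option (List (String × String)) :=
  match name with
  | none => none
  | some s =>
    if s == "" then none
    else
      let n := pvNorm (some s)
      match pvLoopExact boards n with
      | some b => some b
      | none => pvLoopSub boards n

-- ===== PORT B =====
-- single pass with a `first_sub` accumulator
def pvLoopB (boards : List (List (String × String))) (n : String) (firstSub : Option (List (String × String))) : Option (List (String × String)) :=
  match boards with
  | [] => firstSub
  | b :: bs =>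
    let m := pvNorm ((PySem.Dict.mk b).get? "name")
    if m == n then some b
    else pvLoopB bs n (if firstSub.isNone && PySem.Str.isIn n m then some b else firstSub)

def find_board_py_alt (boards : List (List (String × String))) (name : Option String) : Option (List (String × String)) :=
  match name with
  | none => none
  | some s =>
    if s == "" then none
    else pvLoopB boards (pvNorm (some s)) none

-- ===== PRECONDITION & SPEC =====
def Spec_find_board_py (boards : List (List (String × String))) (name : Option String) (out : Option (List (String × String))) : Prop := out = find_board_py_alt boards name
instance (boards : List (List (String × String))) (name : Option String) (out : Option (List (String × String))) : Decidable (Spec_find_board_py boards name out) := by unfold Spec_find_board_py; infer_instance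

-- ===== CLAIM (what is proved, stated in full; the proofs are below) =====
def Claim_equal_find_board_py : Prop := ∀ (boards : List (List (String × String))) (name : Option String), Dom_find_board_py boards name → Spec_find_board_py boards name (find_board_py boards name)

-- ===== LEMMAS AND PROOFS =====

-- loop invariant: B's single pass equals A's exact scan, falling back to the recorded
-- candidate (which beats later substring hits) and then A's substring scan.
theorem pvLoopB_eq (n : String) (bs : List (List (String × String))) (cand : Option (List (String × String))) :
    pvLoopB bs n cand =
      match pvLoopExact bs n with
      | some b => some b
      | none => match cand with
        | some c => some c
        | none => pvLoopSub bs n := by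
  induction bs generalizing cand with
  | nil => cases cand <;> simp [pvLoopB, pvLoopExact, pvLoopSub]
  | cons b bs ih =>
    simp only [pvLoopB, pvLoopExact, pvLoopSub]
    cases hm : (pvNorm ((PySem.Dict.mk b).get? "name") == n)
    · simp only [hm, if_neg Bool.false_ne_true, ih]
      cases cand with
      | some c => simp
      | none =>
        cases hs : PySem.Str.isIn n (pvNorm ((PySem.Dict.mk b).get? "name")) <;> simp [hs]
    · simp [hm]

theorem find_board_py_spec : Claim_equal_find_board_py := by
  intro boards name _
  unfold Spec_find_board_py find_board_py find_board_py_alt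
  cases name with
  | none => rfl
  | some s =>
    by_cases hs : s == ""
    · simp [hs]
    · simp only [hs, Bool.false_ne_true]
      rw [pvLoopB_eq]
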